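-- pv_equiv track=rewrite | github.com/ihgazni2/dlixhict-didactic | xdict/elist.py | indexes_seqsnot
-- ===== SOURCE A (Python) =====
-- def indexes_seqsnot(ol,value,seqs):
--     '''
--         from xdict.elist import *
--         ol = [1,'a',3,'a',4,'a',5]
--         indexes_seqsnot(ol,'a',{0,2})
--         indexes_seqsnot(ol,'a',{0,1})
--         indexes_seqsnot(ol,'a',{1,2})
--         indexes_seqsnot(ol,'a',{3,4})
--     '''
--     seqs = list(seqs)
--     length = ol.__len__()
--     indexes =[]
--     seq = -1
--     for i in range(0,length):
--         if(value == ol[i]):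
--             pass
--         else:
--             seq = seq + 1
--             if(seq in seqs):
--                 indexes.append(i)
--             else:
--                 pass
--     return(indexes)
-- ===== SOURCE B (Python) =====
-- def indexes_seqsnot(ol, value, seqs):
--     # Build the table of positions of non-value elements once,
--     # then address it directly by rank instead of scanning with a counter.
--     filtered = [i for i, x in enumerate(ol) if x != value]
--     return [filtered[s] for s in sorted(set(seqs)) if 0 <= s < len(filtered)]
-- ===== Notes on version B (the rewrite author's own statement) =====
-- stated objective: faster
-- what changed: Replaced A's scan with a running counter and per-element membership test in seqs by building the position table of non-value elements once and selecting from it directly by sorted deduplicated rank with a range guard.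
import Mathlib
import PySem

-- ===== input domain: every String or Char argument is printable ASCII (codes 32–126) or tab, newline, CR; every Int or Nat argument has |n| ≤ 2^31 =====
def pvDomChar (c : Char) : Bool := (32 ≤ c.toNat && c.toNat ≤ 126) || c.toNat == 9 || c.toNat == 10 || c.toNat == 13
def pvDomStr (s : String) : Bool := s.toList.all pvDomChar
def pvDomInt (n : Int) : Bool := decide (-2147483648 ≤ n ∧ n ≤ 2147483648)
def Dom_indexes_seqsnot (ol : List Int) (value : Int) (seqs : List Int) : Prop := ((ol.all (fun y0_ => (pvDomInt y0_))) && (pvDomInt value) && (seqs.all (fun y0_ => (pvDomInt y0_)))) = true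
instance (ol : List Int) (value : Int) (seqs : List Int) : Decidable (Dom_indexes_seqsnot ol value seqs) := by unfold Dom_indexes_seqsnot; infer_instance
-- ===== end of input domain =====

-- B replaces A's counter-scan with a position table addressed by sorted deduplicated rank (simpler decomposition).

-- ===== PORT A =====
def indexes_seqsnot (ol : List Int) (value : Int) (seqs : List Int) : List Int :=
  -- seqs = list(seqs): identity on a list argument
  let seqsL := seqs
  let length : Int := (ol.length : Int)
  -- for i in range(0, length): if value == ol[i]: pass else: seq += 1; if seq in seqs: indexes.append(i)
  let st := (PySem.List.pyRange 0 length 1).foldl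
    (fun (st : Int × List Int) i =>
      if value == PySem.List.pyGetD ol i 0 then st   -- ol[i]: i always in range here
      else
        let seq := st.1 + 1
        (seq, if seq ∈ seqsL then st.2 ++ [i] else st.2))
    (-1, [])
  st.2

-- ===== PORT B =====
def indexes_seqsnot_alt (ol : List Int) (value : Int) (seqs : List Int) : List Int :=
  -- filtered = [i for i, x in enumerate(ol) if x != value]
  let filtered := (PySem.List.enumerate ol 0).filterMap
      (fun p => if p.2 ≠ value then some p.1 else none)
  -- [filtered[s] for s in sorted(set(seqs)) if 0 <= s < len(filtered)]
  ((PySem.List.sorted (PySem.Set.ofList seqs) (fun s => s) false).filter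
      (fun s => decide (0 ≤ s ∧ s < (filtered.length : Int)))).map
    (fun s => PySem.List.pyGetD filtered s 0)   -- filtered[s]: guard keeps s in range

-- ===== PRECONDITION & SPEC =====
def Spec_indexes_seqsnot (ol : List Int) (value : Int) (seqs : List Int) (out : List Int) : Prop := out = indexes_seqsnot_alt ol value seqs
instance (ol : List Int) (value : Int) (seqs : List Int) (out : List Int) : Decidable (Spec_indexes_seqsnot ol value seqs out) := by unfold Spec_indexes_seqsnot; infer_instance

-- ===== CLAIM (what is proved, stated in full; the proofs are below) =====
def Claim_equal_indexes_seqsnot : Prop := ∀ (ol : List Int) (value : Int) (seqs : List Int), Dom_indexes_seqsnot ol value seqs → Spec_indexes_seqsnot ol value seqs (indexes_seqsnot ol value seqs)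

-- ===== LEMMAS AND PROOFS =====

-- the position table both characterizations share, over an explicit pair list
def pvTab (value : Int) (l : List (Int × Int)) : List Int :=
  l.filterMap (fun p => if p.2 ≠ value then some p.1 else none)

-- A's loop, characterized: the counter advances by the table's length and the
-- appended indices are the table entries whose rank is a member of seqs.
lemma loopA (value : Int) (seqs : List Int) :
    ∀ (l : List (Int × Int)) (c : Int) (acc : List Int),
    l.foldl
      (fun (st : Int × List Int) p =>
        if value == p.2 then st
        else
          let seq := st.1 + 1
          (seq, if seq ∈ seqs then st.2 ++ [p.1] else st.2)) (c, acc)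
    = (c + (pvTab value l).length,
       acc ++ ((PySem.List.enumerate (pvTab value l) (c + 1)).filter
          (fun q => decide (q.1 ∈ seqs))).map (·.2)) := by
  intro l
  induction l with
  | nil => intro c acc; simp [pvTab]
  | cons p l ih =>
    intro c acc
    rw [List.foldl_cons]
    by_cases h : p.2 = value
    · rw [if_pos (by simp [h]), ih c acc]
      have htab : pvTab value (p :: l) = pvTab value l := by
        simp only [pvTab, List.filterMap_cons, h, ne_eq, not_true_eq_false,
          if_false]
      rw [htab]
    · rw [if_neg (by simp only [beq_iff_eq]; exact fun hb => h hb.symm)]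
      show List.foldl _ (c + 1, if c + 1 ∈ seqs then acc ++ [p.1] else acc) l = _
      rw [ih (c + 1) (if c + 1 ∈ seqs then acc ++ [p.1] else acc)]
      have htab : pvTab value (p :: l) = p.1 :: pvTab value l := by
        simp only [pvTab, List.filterMap_cons, if_pos h]
      rw [htab, PySem.List.enumerate_cons, List.filter_cons]
      by_cases hm : c + 1 ∈ seqs
      · simp only [hm, decide_true, if_true, List.length_cons, List.map_cons,
          List.cons_append, List.append_assoc, List.nil_append, Prod.mk.injEq]
        exact ⟨by push_cast; ring, trivial⟩
      · simp only [hm, decide_false, Bool.false_eq_true, if_false, List.length_cons,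
          Prod.mk.injEq]
        exact ⟨by push_cast; ring, trivial⟩

lemma tab_A (ol : List Int) (value : Int) (seqs : List Int) :
    indexes_seqsnot ol value seqs
    = ((PySem.List.enumerate (pvTab value (PySem.List.enumerate ol 0)) 0).filter
        (fun q => decide (q.1 ∈ seqs))).map (·.2) := by
  unfold indexes_seqsnot
  have he : (PySem.List.pyRange 0 (ol.length : Int) 1).foldl
      (fun (st : Int × List Int) i =>
        if value == PySem.List.pyGetD ol i 0 then st
        else
          let seq := st.1 + 1
          (seq, if seq ∈ seqs then st.2 ++ [i] else st.2)) (-1, [])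
      = (PySem.List.enumerate ol 0).foldl
      (fun (st : Int × List Int) p =>
        if value == p.2 then st
        else
          let seq := st.1 + 1
          (seq, if seq ∈ seqs then st.2 ++ [p.1] else st.2)) (-1, []) := by
    rw [PySem.List.enumerate_eq_map_pyRange (d := 0), List.foldl_map]
    rfl
  simp only [he, loopA value seqs (PySem.List.enumerate ol 0) (-1) []]
  norm_num

-- B's selected ranks coincide with the ranks of the table entries A keeps
lemma ranks_eq (seqs : List Int) (F : List Int) :
    ((PySem.List.sorted (PySem.Set.ofList seqs) (fun s => s) false).filter
        (fun s => decide (0 ≤ s ∧ s < (F.length : Int))))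
    = ((PySem.List.enumerate F 0).filter (fun q => decide (q.1 ∈ seqs))).map (·.1) := by
  set L1 := ((PySem.List.sorted (PySem.Set.ofList seqs) (fun s => s) false).filter
      (fun s => decide (0 ≤ s ∧ s < (F.length : Int)))) with hL1
  set L2 := ((PySem.List.enumerate F 0).filter (fun q => decide (q.1 ∈ seqs))).map (·.1) with hL2
  have hnd1 : (PySem.List.sorted (PySem.Set.ofList seqs) (fun s => s) false).Nodup :=
    (PySem.List.sorted_perm _ _ _).nodup_iff.mpr (PySem.Set.nodup_ofList seqs)
  have hp1 : L1.Pairwise (· < ·) := by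
    apply List.Pairwise.filter
    have hle : (PySem.List.sorted (PySem.Set.ofList seqs) (fun s => s) false).Pairwise (· ≤ ·) :=
      PySem.List.sorted_pairwise _ _
    exact (hle.and hnd1).imp (fun h => lt_of_le_of_ne h.1 h.2)
  have hp2 : L2.Pairwise (· < ·) := by
    rw [hL2, List.pairwise_map]
    exact List.Pairwise.filter _ (PySem.List.pairwise_lt_enumerate F 0)
  have hmem : ∀ x, x ∈ L1 ↔ x ∈ L2 := by
    intro x
    rw [hL1, hL2]
    simp only [List.mem_filter, List.mem_map, PySem.List.mem_sorted, PySem.Set.mem_ofList,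
      decide_eq_true_eq]
    constructor
    · rintro ⟨hs, hge, hlt⟩
      refine ⟨(x, F[x.toNat]'(by omega)), ⟨?_, by simpa using hs⟩, rfl⟩
      rw [PySem.List.mem_enumerate_iff]
      exact ⟨x.toNat, by omega, by simp [Int.toNat_of_nonneg hge]⟩
    · rintro ⟨q, ⟨hq, hqs⟩, rfl⟩
      rw [PySem.List.mem_enumerate_iff] at hq
      obtain ⟨k, hk, rfl⟩ := hq
      exact ⟨by simpa using hqs, by simp, by simp; omega⟩
  have hnd1' : L1.Nodup := hnd1.filter _
  have hnd2 : L2.Nodup := (hp2.imp (fun h => ne_of_lt h) : L2.Pairwise (· ≠ ·))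
  have hperm : L2.Perm L1 := (List.perm_ext_iff_of_nodup hnd2 hnd1').mpr (fun x => (hmem x).symm)
  calc L1 = PySem.List.sorted L1 (fun s => s) :=
        (PySem.List.sorted_eq_self_of_pairwise L1 (fun s => s) (hp1.imp le_of_lt)).symm
    _ = L2 := PySem.List.sorted_eq_of_perm_of_pairwise_lt L1 L2 (fun s => s) hperm hp2

lemma tab_B (ol : List Int) (value : Int) (seqs : List Int) :
    indexes_seqsnot_alt ol value seqs
    = ((PySem.List.enumerate (pvTab value (PySem.List.enumerate ol 0)) 0).filter
        (fun q => decide (q.1 ∈ seqs))).map (·.2) := by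
  unfold indexes_seqsnot_alt
  set F := pvTab value (PySem.List.enumerate ol 0) with hF
  show ((PySem.List.sorted (PySem.Set.ofList seqs) (fun s => s) false).filter
      (fun s => decide (0 ≤ s ∧ s < (F.length : Int)))).map (fun s => PySem.List.pyGetD F s 0)
    = _
  rw [ranks_eq seqs F, List.map_map]
  apply List.map_congr_left
  intro q hq
  have hq' := (List.mem_filter.mp hq).1
  rw [PySem.List.mem_enumerate_iff] at hq'
  obtain ⟨k, hk, rfl⟩ := hq'
  simp [PySem.List.pyGetD_natCast, hk]

-- ===== VERDICT (by name: the statement is the Claim_ definition above) =====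
theorem indexes_seqsnot_spec : Claim_equal_indexes_seqsnot := by
  intro ol value seqs _
  unfold Spec_indexes_seqsnot
  rw [tab_A, tab_B]
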